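-- pv_equiv track=rewrite | github.com/JaneliaSciComp/tensorswitch | src/tensorswitch/utils.py | get_chunk_linear_indices_in_shard
-- ===== SOURCE A (Python) =====
-- def get_chunk_linear_indices_in_shard(shard_coord, shard_shape, chunk_shape, chunk_grid):
--     """
--     Generate linear indices for all chunks within a specific shard.
--     Works for N-dimensional data (2D, 3D, 4D, 5D, etc.).
--
--     Args:
--         shard_coord: N-D shard coordinate (e.g., [z, y, x] for 3D or [c, z, y, x] for 4D)
--         shard_shape: Shape of each shard (e.g., [1024, 1024, 1024])
--         chunk_shape: Shape of each chunk (e.g., [32, 32, 32])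
--         chunk_grid: Total number of chunks in each dimension across entire array
--
--     Returns:
--         list: Linear indices of all chunks within this shard that are within data bounds
--
--     Example:
--         >>> # For 4D data (C,Z,Y,X) with shard at [0,0,0,0]
--         >>> indices = get_chunk_linear_indices_in_shard(
--         ...     shard_coord=[0, 0, 0, 0],
--         ...     shard_shape=[1, 1024, 1024, 1024],
--         ...     chunk_shape=[1, 32, 32, 32],
--         ...     chunk_grid=[3, 598, 15708, 8818]
--         ... )
--         >>> len(indices)  # Should be 1 * 32 * 32 * 32 = 32768 (or less at boundaries)
--     """
--     import itertools
--
--     # Calculate how many chunks fit in each dimension of the shard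
--     chunks_per_shard_dim = [
--         shard_shape[i] // chunk_shape[i]
--         for i in range(len(shard_shape))
--     ]
--
--     # Base chunk coordinate for this shard (where this shard starts in chunk space)
--     base_chunk_coord = [
--         shard_coord[i] * chunks_per_shard_dim[i]
--         for i in range(len(shard_coord))
--     ]
--
--     # Generate all chunk indices within this shard using N-D iteration
--     chunk_indices = []
--     for chunk_offset in itertools.product(*[range(dim) for dim in chunks_per_shard_dim]):
--         # Calculate absolute chunk coordinate in the array
--         chunk_coord = [
--             base_chunk_coord[i] + chunk_offset[i]
--             for i in range(len(base_chunk_coord))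
--         ]
--
--         # Skip if chunk is outside data bounds
--         if any(chunk_coord[i] >= chunk_grid[i] for i in range(len(chunk_coord))):
--             continue
--
--         # Convert N-D chunk coordinate to linear index (row-major order)
--         linear_idx = 0
--         stride = 1
--         for i in range(len(chunk_coord) - 1, -1, -1):
--             linear_idx += chunk_coord[i] * stride
--             stride *= chunk_grid[i]
--
--         chunk_indices.append(linear_idx)
--
--     return chunk_indices
-- ===== SOURCE B (Python) =====
-- def get_chunk_linear_indices_in_shard(shard_coord, shard_shape, chunk_shape, chunk_grid):
--     """Clamp-first construction: compute the valid chunk-count box per dimension up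
--     front, then emit the linear indices directly dimension by dimension (back to
--     front), with no generate-all-then-filter pass."""
--     n = len(shard_shape)
--     cps = [shard_shape[i] // chunk_shape[i] for i in range(n)]
--     bases = [shard_coord[i] * cps[i] for i in range(n)]
--     valids = [max(0, min(cps[i], chunk_grid[i] - bases[i])) for i in range(n)]
--     if any(v == 0 for v in valids):
--         return []
--     indices = [0]
--     stride = 1
--     for i in range(n - 1, -1, -1):
--         indices = [(bases[i] + o) * stride + x for o in range(valids[i]) for x in indices]
--         stride *= chunk_grid[i]
--     return indices
-- ===== Notes on version B (the rewrite author's own statement) =====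
-- stated objective: alternative
-- what changed: B replaces A's generate-all-offsets-then-filter itertools.product loop (with a separate backwards stride loop per kept coordinate) by a structural recursion over the dimensions that clamps each dimension to its valid chunk count up front and emits the linear indices directly, threading the row-major stride through the recursion.
-- outside the precondition, e.g. on get_chunk_linear_indices_in_shard([0], [2, 2], [1, 1], [4]): A returns [0, 0, 1, 1], B raises IndexError; on get_chunk_linear_indices_in_shard([0], [0], [1], []): A returns [], B raises IndexError
import Mathlib
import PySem

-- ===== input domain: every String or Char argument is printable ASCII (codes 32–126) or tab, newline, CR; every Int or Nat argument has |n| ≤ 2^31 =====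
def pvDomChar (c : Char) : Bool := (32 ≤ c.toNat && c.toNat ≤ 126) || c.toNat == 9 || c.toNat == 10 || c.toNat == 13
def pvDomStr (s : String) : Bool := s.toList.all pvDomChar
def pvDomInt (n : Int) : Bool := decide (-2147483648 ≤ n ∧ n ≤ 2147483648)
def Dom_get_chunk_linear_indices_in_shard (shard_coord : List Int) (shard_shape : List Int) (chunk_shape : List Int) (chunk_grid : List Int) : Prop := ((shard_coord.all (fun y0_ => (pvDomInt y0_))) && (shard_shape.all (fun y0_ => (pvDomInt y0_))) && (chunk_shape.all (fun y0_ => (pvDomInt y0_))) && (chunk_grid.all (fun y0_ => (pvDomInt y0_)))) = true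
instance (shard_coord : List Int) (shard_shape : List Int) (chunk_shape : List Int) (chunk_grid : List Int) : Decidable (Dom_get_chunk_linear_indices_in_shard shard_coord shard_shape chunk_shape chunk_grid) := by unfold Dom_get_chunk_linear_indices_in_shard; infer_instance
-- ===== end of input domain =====

-- B replaces A's generate-all-then-filter itertools.product loop by a structural recursion
-- over the dimensions that clamps each dimension to its valid chunk count and emits the
-- linear indices directly (objective: alternative algorithm, same exact output order).

-- ===== PORT A =====
-- itertools.product(*[range(d) for d in dims]) in lexicographic order (first factor slowest)
def pyProduct : List Int → List (List Int)
  | [] => [[]]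
  | d :: ds => (PySem.List.pyRange 0 d 1).flatMap (fun o => (pyProduct ds).map (fun t => o :: t))

def get_chunk_linear_indices_in_shard (shard_coord : List Int) (shard_shape : List Int) (chunk_shape : List Int) (chunk_grid : List Int) : List Int :=
  -- chunks_per_shard_dim = [shard_shape[i] // chunk_shape[i] for i in range(len(shard_shape))]
  let cps := (List.range shard_shape.length).map
    (fun i => PySem.Int.floordiv (shard_shape.getD i 0) (chunk_shape.getD i 0))
  -- base_chunk_coord = [shard_coord[i] * cps[i] for i in range(len(shard_coord))]
  let base := (List.range shard_coord.length).map (fun i => shard_coord.getD i 0 * cps.getD i 0)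
  -- for chunk_offset in itertools.product(...): filter then append linear index
  (pyProduct cps).foldl
    (fun acc off =>
      let coord := (List.range base.length).map (fun i => base.getD i 0 + off.getD i 0)
      if (List.range coord.length).any (fun i => decide (chunk_grid.getD i 0 ≤ coord.getD i 0)) then acc
      else
        -- linear_idx loop: for i in range(len(coord)-1, -1, -1), state (linear_idx, stride)
        acc ++ [(((List.range coord.length).reverse).foldl
          (fun p i => (p.1 + coord.getD i 0 * p.2, p.2 * chunk_grid.getD i 0)) ((0:Int),(1:Int))).1])
    []

-- ===== PORT B =====
def get_chunk_linear_indices_in_shard_alt (shard_coord : List Int) (shard_shape : List Int) (chunk_shape : List Int) (chunk_grid : List Int) : List Int :=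
  let n := shard_shape.length
  -- cps = [shard_shape[i] // chunk_shape[i] for i in range(n)]
  let cps := (List.range n).map
    (fun i => PySem.Int.floordiv (shard_shape.getD i 0) (chunk_shape.getD i 0))
  -- bases = [shard_coord[i] * cps[i] for i in range(n)]
  let bases := (List.range n).map (fun i => shard_coord.getD i 0 * cps.getD i 0)
  -- valids = [max(0, min(cps[i], chunk_grid[i] - bases[i])) for i in range(n)]
  let valids := (List.range n).map
    (fun i => max 0 (min (cps.getD i 0) (chunk_grid.getD i 0 - bases.getD i 0)))
  if valids.any (fun v => v == 0) then []
  else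
    -- for i in range(n-1, -1, -1): rebuild indices, state (indices, stride)
    (((List.range n).reverse).foldl
      (fun p i =>
        ((PySem.List.pyRange 0 (valids.getD i 0) 1).flatMap
            (fun o => p.1.map (fun x => (bases.getD i 0 + o) * p.2 + x)),
         p.2 * chunk_grid.getD i 0))
      ([0], (1:Int))).1

-- ===== PRECONDITION & SPEC =====
-- Pre_ excludes zero chunk sizes (A: ZeroDivisionError) and mismatched list lengths: with
-- chunk_shape shorter A raises IndexError, and with shard_coord or chunk_grid shorter A either
-- raises or returns an accidental value built from only a prefix of the dimensions (duplicated
-- or empty output), where B's recursion naturally raises IndexError instead.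
def Pre_get_chunk_linear_indices_in_shard (shard_coord : List Int) (shard_shape : List Int) (chunk_shape : List Int) (chunk_grid : List Int) : Prop :=
  shard_coord.length = shard_shape.length ∧
  shard_shape.length ≤ chunk_shape.length ∧
  shard_shape.length ≤ chunk_grid.length ∧
  ∀ i ∈ List.range shard_shape.length, chunk_shape.getD i 0 ≠ 0
instance (shard_coord : List Int) (shard_shape : List Int) (chunk_shape : List Int) (chunk_grid : List Int) : Decidable (Pre_get_chunk_linear_indices_in_shard shard_coord shard_shape chunk_shape chunk_grid) := by unfold Pre_get_chunk_linear_indices_in_shard; infer_instance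

def pvWitness_get_chunk_linear_indices_in_shard : List Int × List Int × List Int × List Int :=
  ([0, 1], [4, 3], [2, 1], [5, 6])

def Spec_get_chunk_linear_indices_in_shard (shard_coord : List Int) (shard_shape : List Int) (chunk_shape : List Int) (chunk_grid : List Int) (out : List Int) : Prop := out = get_chunk_linear_indices_in_shard_alt shard_coord shard_shape chunk_shape chunk_grid
instance (shard_coord : List Int) (shard_shape : List Int) (chunk_shape : List Int) (chunk_grid : List Int) (out : List Int) : Decidable (Spec_get_chunk_linear_indices_in_shard shard_coord shard_shape chunk_shape chunk_grid out) := by unfold Spec_get_chunk_linear_indices_in_shard; infer_instance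

-- ===== CLAIM (what is proved, stated in full; the proofs are below) =====
def Claim_equal_get_chunk_linear_indices_in_shard : Prop := ∀ (shard_coord : List Int) (shard_shape : List Int) (chunk_shape : List Int) (chunk_grid : List Int), Dom_get_chunk_linear_indices_in_shard shard_coord shard_shape chunk_shape chunk_grid → Pre_get_chunk_linear_indices_in_shard shard_coord shard_shape chunk_shape chunk_grid → Spec_get_chunk_linear_indices_in_shard shard_coord shard_shape chunk_shape chunk_grid (get_chunk_linear_indices_in_shard shard_coord shard_shape chunk_shape chunk_grid)

-- ===== LEMMAS AND PROOFS =====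
-- generic: an index-comprehension over range(len xs) reading two lists is a zipWith
theorem pvRangeMapZip {α : Type} (f : Int → Int → α) :
    ∀ (xs ys : List Int), xs.length ≤ ys.length →
      (List.range xs.length).map (fun i => f (xs.getD i 0) (ys.getD i 0)) = List.zipWith f xs ys := by
  intro xs
  induction xs with
  | nil => intro ys h; simp
  | cons x xs ih =>
    intro ys h
    cases ys with
    | nil => simp at h
    | cons y ys =>
      simp only [List.length_cons, List.range_succ_eq_map, List.map_cons, List.map_map,
        List.getD_cons_zero, List.zipWith_cons_cons]
      refine congrArg _ ?_
      have := ih ys (by simpa using h)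
      simpa [Function.comp] using this

theorem pvRangeAnyZip (p : Int → Int → Bool) :
    ∀ (xs ys : List Int), xs.length ≤ ys.length →
      (List.range xs.length).any (fun i => p (xs.getD i 0) (ys.getD i 0)) = (List.zipWith p xs ys).any id := by
  intro xs
  induction xs with
  | nil => intro ys h; simp
  | cons x xs ih =>
    intro ys h
    cases ys with
    | nil => simp at h
    | cons y ys =>
      simp only [List.length_cons, List.range_succ_eq_map, List.any_cons, List.any_map,
        List.getD_cons_zero, List.zipWith_cons_cons]
      refine congrArg _ ?_
      have := ih ys (by simpa using h)
      simpa [Function.comp] using this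

-- structural version of A's backwards linear-index loop: (linear, stride)
def pvLinPair : List Int → List Int → Int × Int
  | x :: xs, y :: ys => ((pvLinPair xs ys).1 + x * (pvLinPair xs ys).2, (pvLinPair xs ys).2 * y)
  | _, _ => (0, 1)

theorem pvLinRev :
    ∀ (xs ys : List Int), xs.length ≤ ys.length →
      ((List.range xs.length).reverse).foldl
        (fun p i => (p.1 + xs.getD i 0 * p.2, p.2 * ys.getD i 0)) ((0:Int),(1:Int))
      = pvLinPair xs ys := by
  intro xs
  induction xs with
  | nil => intro ys h; simp [pvLinPair]
  | cons x xs ih =>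
    intro ys h
    cases ys with
    | nil => simp at h
    | cons y ys =>
      have ih' := ih ys (by simpa using h)
      rw [List.foldl_reverse] at ih' ⊢
      simp only [List.length_cons, List.range_succ_eq_map, List.foldr_cons, List.foldr_map,
        List.getD_cons_zero, List.getD_cons_succ]
      rw [ih']
      simp [pvLinPair]
theorem pvLinPairSnd :
    ∀ (xs ys : List Int), xs.length = ys.length → (pvLinPair xs ys).2 = ys.prod := by
  intro xs
  induction xs with
  | nil => intro ys h; cases ys with
    | nil => simp [pvLinPair]
    | cons y ys => simp at h
  | cons x xs ih =>
    intro ys h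
    cases ys with
    | nil => simp at h
    | cons y ys =>
      simp only [pvLinPair, List.prod_cons]
      rw [ih ys (by simpa using h)]
      ring

theorem pvLinPairTake :
    ∀ (xs ys : List Int), pvLinPair xs (ys.take xs.length) = pvLinPair xs ys := by
  intro xs
  induction xs with
  | nil => intro ys; simp [pvLinPair]
  | cons x xs ih =>
    intro ys
    cases ys with
    | nil => simp
    | cons y ys => simp [pvLinPair, ih ys]

theorem pvZipWithTakeRight {α : Type} (f : Int → Int → α) :
    ∀ (xs ys : List Int), List.zipWith f xs (ys.take xs.length) = List.zipWith f xs ys := by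
  intro xs
  induction xs with
  | nil => intro ys; simp
  | cons x xs ih =>
    intro ys
    cases ys with
    | nil => simp
    | cons y ys => simp [ih ys]

theorem pvProdMemLength : ∀ (ds : List Int) (off : List Int), off ∈ pyProduct ds → off.length = ds.length := by
  intro ds
  induction ds with
  | nil => intro off h; simp [pyProduct] at h; simp [h]
  | cons d ds ih =>
    intro off h
    simp only [pyProduct, List.mem_flatMap, List.mem_map] at h
    obtain ⟨o, _, t, ht, rfl⟩ := h
    simp [ih t ht]

theorem pvFoldlSkipIf {α β : Type} (p : α → Bool) (f : α → β) :
    ∀ (l : List α) (acc : List β),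
      l.foldl (fun acc x => if p x then acc else acc ++ [f x]) acc
        = acc ++ (l.filter (fun x => !p x)).map f := by
  intro l
  induction l with
  | nil => intro acc; simp
  | cons a l ih =>
    intro acc
    cases h : p a <;> simp [List.foldl_cons, h, ih]

theorem pvFilterRangeLt (m t : Nat) :
    (List.range m).filter (fun k => decide (k < t)) = List.range (min m t) := by
  induction m with
  | zero => simp
  | succ m ih =>
    rw [List.range_succ, List.filter_append, ih]
    by_cases h : m < t
    · have h1 : min (m + 1) t = min m t + 1 := by omega
      have h2 : min m t = m := by omega
      simp [h, h2, List.range_succ]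
    · have h1 : min (m + 1) t = min m t := by omega
      simp [h, h1]

theorem pvFilterPyRangeLt (b g d : Int) :
    (PySem.List.pyRange 0 d 1).filter (fun o => !decide (g ≤ b + o))
      = PySem.List.pyRange 0 (max 0 (min d (g - b))) 1 := by
  rw [PySem.List.pyRange_one, PySem.List.pyRange_one]
  rw [List.filter_map]
  have hpred : ∀ k ∈ List.range (d - 0).toNat,
      ((fun o => !decide (g ≤ b + o)) ∘ fun (k : Nat) => (0:Int) + k) k = decide (k < (g - b).toNat) := by
    intro k _
    simp only [Function.comp_apply]
    by_cases h : g ≤ b + ((0:Int) + k)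
    · simp only [h, decide_true, Bool.not_true]
      have : ¬ ((k:Int) < g - b) := by omega
      simp; omega
    · simp only [h, decide_false, Bool.not_false]
      have : (k:Int) < g - b := by omega
      simp; omega
  rw [List.filter_congr hpred, pvFilterRangeLt]
  have h : min (d - 0).toNat (g - b).toNat = (max 0 (min d (g - b)) - 0).toNat := by omega
  rw [h]
-- structural core of B with base/cps precomputed per dimension
def pvBSpec : List Int → List Int → List Int → (List Int × Int)
  | b :: bs, d :: ds, g :: gs =>
    let r := pvBSpec bs ds gs
    ((PySem.List.pyRange 0 (max 0 (min d (g - b))) 1).flatMap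
        (fun o => r.1.map (fun x => (b + o) * r.2 + x)),
     r.2 * g)
  | _, _, _ => ([0], 1)

theorem pvBSpecSnd :
    ∀ (bs ds gs : List Int), bs.length = ds.length → bs.length = gs.length →
      (pvBSpec bs ds gs).2 = gs.prod := by
  intro bs
  induction bs with
  | nil =>
    intro ds gs h1 h2
    cases gs with
    | nil => simp [pvBSpec]
    | cons g gs => simp at h2
  | cons b bs ih =>
    intro ds gs h1 h2
    cases ds with
    | nil => simp at h1
    | cons d ds =>
      cases gs with
      | nil => simp at h2
      | cons g gs =>
        simp only [pvBSpec, List.prod_cons]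
        rw [ih ds gs (by simpa using h1) (by simpa using h2)]
        ring

-- the central equivalence: A's filtered-product-then-linearize equals B's clamped recursion
theorem pvFlatMapIteNil {α β : Type} (p : α → Prop) [DecidablePred p] (F : α → List β) :
    ∀ (l : List α), (l.flatMap (fun o => if p o then [] else F o))
      = (l.filter (fun o => !decide (p o))).flatMap F := by
  intro l
  induction l with
  | nil => simp
  | cons a l ihl =>
    by_cases h : p a <;> simp [h, ihl]

theorem pvMain :
    ∀ (base cps cg : List Int), base.length = cps.length → cps.length = cg.length →
      ((pyProduct cps).filter
          (fun off => !((List.zipWith (fun c g => decide (g ≤ c))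
              (List.zipWith (· + ·) base off) cg).any id))).map
        (fun off => (pvLinPair (List.zipWith (· + ·) base off) cg).1)
      = (pvBSpec base cps cg).1 := by
  intro base
  induction base with
  | nil =>
    intro cps cg h1 h2
    cases cps with
    | nil => simp [pyProduct, pvBSpec, pvLinPair]
    | cons d ds => simp at h1
  | cons b bs ih =>
    intro cps cg h1 h2
    cases cps with
    | nil => simp at h1
    | cons d ds =>
      cases cg with
      | nil => simp at h2
      | cons g gs =>
        have hbs : bs.length = ds.length := by simpa using h1
        have hds : ds.length = gs.length := by simpa using h2
        simp only [pyProduct, pvBSpec]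
        rw [List.filter_flatMap, List.map_flatMap]
        -- per o: filter of the mapped tail list
        have hinner : ∀ o : Int,
            ((List.filter
                (fun off => !((List.zipWith (fun c g => decide (g ≤ c))
                    (List.zipWith (· + ·) (b :: bs) off) (g :: gs)).any id))
                ((pyProduct ds).map (fun t => o :: t))).map
              (fun off => (pvLinPair (List.zipWith (· + ·) (b :: bs) off) (g :: gs)).1))
            = if g ≤ b + o then [] else
                ((pyProduct ds).filter
                    (fun off => !((List.zipWith (fun c g => decide (g ≤ c))
                        (List.zipWith (· + ·) bs off) gs).any id))).map
                  (fun off => (b + o) * gs.prod + (pvLinPair (List.zipWith (· + ·) bs off) gs).1) := by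
          intro o
          rw [List.filter_map]
          by_cases hgo : g ≤ b + o
          · simp [hgo, Function.comp_def]
          · simp only [hgo, if_false]
            rw [List.map_map]
            have hf : List.filter
                ((fun off => !((List.zipWith (fun c g => decide (g ≤ c))
                    (List.zipWith (· + ·) (b :: bs) off) (g :: gs)).any id)) ∘ (fun t => o :: t))
                (pyProduct ds)
              = List.filter (fun off => !((List.zipWith (fun c g => decide (g ≤ c))
                    (List.zipWith (· + ·) bs off) gs).any id)) (pyProduct ds) := by
              apply List.filter_congr
              intro t _
              simp [Function.comp_apply, hgo]
            rw [hf]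
            apply List.map_congr_left
            intro t ht
            have htlen : t.length = ds.length := pvProdMemLength ds t (List.mem_filter.mp ht).1
            simp only [Function.comp_apply, List.zipWith_cons_cons, pvLinPair]
            have hsnd : (pvLinPair (List.zipWith (· + ·) bs t) gs).2 = gs.prod := by
              apply pvLinPairSnd
              simp [htlen, hbs, hds]
            rw [hsnd]
            ring
        rw [List.flatMap_congr (fun o _ => hinner o)]
        rw [pvFlatMapIteNil]
        rw [pvFilterPyRangeLt]
        apply List.flatMap_congr
        intro o _
        rw [show (fun off => (b + o) * gs.prod + (pvLinPair (List.zipWith (· + ·) bs off) gs).1)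
              = (fun x => (b + o) * gs.prod + x) ∘ (fun off => (pvLinPair (List.zipWith (· + ·) bs off) gs).1) from rfl]
        rw [← List.map_map, ih ds gs hbs hds, pvBSpecSnd bs ds gs hbs (hbs.trans hds)]
theorem pvPortAEq (sc ss cs cg : List Int)
    (h1 : sc.length = ss.length) (h2 : ss.length ≤ cs.length) (h3 : ss.length ≤ cg.length) :
    get_chunk_linear_indices_in_shard sc ss cs cg
      = ((pyProduct (List.zipWith (fun s k => PySem.Int.floordiv s k) ss cs)).filter
            (fun off => !((List.zipWith (fun c g => decide (g ≤ c))
                (List.zipWith (· + ·)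
                  (List.zipWith (fun c q => c * q) sc
                    (List.zipWith (fun s k => PySem.Int.floordiv s k) ss cs)) off) cg).any id))).map
          (fun off => (pvLinPair
            (List.zipWith (· + ·)
              (List.zipWith (fun c q => c * q) sc
                (List.zipWith (fun s k => PySem.Int.floordiv s k) ss cs)) off) cg).1) := by
  have hcps : (List.range ss.length).map
      (fun i => PySem.Int.floordiv (ss.getD i 0) (cs.getD i 0))
      = List.zipWith (fun s k => PySem.Int.floordiv s k) ss cs :=
    pvRangeMapZip _ ss cs h2
  have hcpslen : (List.zipWith (fun s k => PySem.Int.floordiv s k) ss cs).length = ss.length := by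
    simp [List.length_zipWith]; omega
  have hbase : (List.range sc.length).map
      (fun i => sc.getD i 0 * (List.zipWith (fun s k => PySem.Int.floordiv s k) ss cs).getD i 0)
      = List.zipWith (fun c q => c * q) sc (List.zipWith (fun s k => PySem.Int.floordiv s k) ss cs) :=
    pvRangeMapZip _ sc _ (by omega)
  have hbaselen : (List.zipWith (fun c q => c * q) sc
      (List.zipWith (fun s k => PySem.Int.floordiv s k) ss cs)).length = sc.length := by
    simp [List.length_zipWith]; omega
  simp only [get_chunk_linear_indices_in_shard]
  rw [hcps, hbase, pvFoldlSkipIf, List.nil_append]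
  set CPS := List.zipWith (fun s k => PySem.Int.floordiv s k) ss cs with hCPS
  set BASE := List.zipWith (fun c q => c * q) sc CPS with hBASE
  have hfilter : (pyProduct CPS).filter
      (fun off => !((List.range ((List.range BASE.length).map
          (fun i => BASE.getD i 0 + off.getD i 0)).length).any
        (fun i => decide (cg.getD i 0 ≤ ((List.range BASE.length).map
          (fun i => BASE.getD i 0 + off.getD i 0)).getD i 0))))
      = (pyProduct CPS).filter
          (fun off => !((List.zipWith (fun c g => decide (g ≤ c))
              (List.zipWith (· + ·) BASE off) cg).any id)) := by
    apply List.filter_congr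
    intro off hoff
    have hofflen : off.length = CPS.length := pvProdMemLength CPS off hoff
    have hcoord : (List.range BASE.length).map (fun i => BASE.getD i 0 + off.getD i 0)
        = List.zipWith (· + ·) BASE off :=
      pvRangeMapZip _ BASE off (by omega)
    rw [hcoord]
    have hclen : (List.zipWith (· + ·) BASE off).length ≤ cg.length := by
      simp [List.length_zipWith]; omega
    rw [pvRangeAnyZip (fun c g => decide (g ≤ c)) _ cg hclen]
  rw [hfilter]
  apply List.map_congr_left
  intro off hoff
  have hofflen : off.length = CPS.length :=
    pvProdMemLength CPS off (List.mem_filter.mp hoff).1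
  have hcoord : (List.range BASE.length).map (fun i => BASE.getD i 0 + off.getD i 0)
      = List.zipWith (· + ·) BASE off :=
    pvRangeMapZip _ BASE off (by omega)
  rw [hcoord]
  have hclen : (List.zipWith (· + ·) BASE off).length ≤ cg.length := by
    simp [List.length_zipWith]; omega
  rw [pvLinRev _ cg hclen]

-- three-list analogue of pvRangeMapZip, for B's valids comprehension
def pvZip3 {α : Type} (f : Int → Int → Int → α) : List Int → List Int → List Int → List α
  | x :: xs, y :: ys, z :: zs => f x y z :: pvZip3 f xs ys zs
  | _, _, _ => []

theorem pvRangeMapZip3 {α : Type} (f : Int → Int → Int → α) :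
    ∀ (xs ys zs : List Int), xs.length ≤ ys.length → xs.length ≤ zs.length →
      (List.range xs.length).map (fun i => f (xs.getD i 0) (ys.getD i 0) (zs.getD i 0))
        = pvZip3 f xs ys zs := by
  intro xs
  induction xs with
  | nil => intro ys zs h1 h2; simp [pvZip3]
  | cons x xs ih =>
    intro ys zs h1 h2
    cases ys with
    | nil => simp at h1
    | cons y ys =>
      cases zs with
      | nil => simp at h2
      | cons z zs =>
        simp only [List.length_cons, List.range_succ_eq_map, List.map_cons, List.map_map,
          List.getD_cons_zero, pvZip3]
        refine congrArg _ ?_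
        have := ih ys zs (by simpa using h1) (by simpa using h2)
        simpa [Function.comp] using this

theorem pvRangeMapZip' {α : Type} (f : Int → Int → α) (n : Nat) (xs ys : List Int)
    (hn : n = xs.length) (h : xs.length ≤ ys.length) :
    (List.range n).map (fun i => f (xs.getD i 0) (ys.getD i 0)) = List.zipWith f xs ys := by
  subst hn; exact pvRangeMapZip f xs ys h

theorem pvRangeMapZip3' {α : Type} (f : Int → Int → Int → α) (n : Nat) (xs ys zs : List Int)
    (hn : n = xs.length) (h1 : xs.length ≤ ys.length) (h2 : xs.length ≤ zs.length) :
    (List.range n).map (fun i => f (xs.getD i 0) (ys.getD i 0) (zs.getD i 0))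
      = pvZip3 f xs ys zs := by
  subst hn; exact pvRangeMapZip3 f xs ys zs h1 h2

-- if some clamped count is zero the emitted index list is empty
theorem pvBSpecNilOfZero :
    ∀ (bases cps cg : List Int), bases.length = cps.length → cps.length ≤ cg.length →
      ((pvZip3 (fun a b c => max 0 (min a (c - b))) cps bases cg).any (fun v => v == 0)) = true →
      (pvBSpec bases cps (cg.take bases.length)).1 = [] := by
  intro bases
  induction bases with
  | nil =>
    intro cps cg h1 h2 hz
    cases cps with
    | nil => simp [pvZip3] at hz
    | cons d ds => simp at h1
  | cons b bs ih =>
    intro cps cg h1 h2 hz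
    cases cps with
    | nil => simp at h1
    | cons d ds =>
      cases cg with
      | nil => simp at h2
      | cons g gs =>
        simp only [pvZip3, List.any_cons] at hz
        simp only [List.length_cons, List.take_succ_cons, pvBSpec]
        rcases Bool.or_eq_true_iff.mp hz with hz0 | hzrest
        · have : max 0 (min d (g - b)) = 0 := by simpa using hz0
          rw [this]
          simp [PySem.List.pyRange_one_eq_nil (by omega : (0:Int) ≤ 0)]
        · rw [ih ds gs (by simpa using h1) (by simpa using h2) hzrest]
          simp

-- B's backwards loop is the structural recursion pvBSpec
theorem pvAltFoldEq :
    ∀ (bases cps cg : List Int), bases.length = cps.length → cps.length ≤ cg.length →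
      ((List.range bases.length).reverse).foldl
        (fun p i =>
          ((PySem.List.pyRange 0 ((pvZip3 (fun a b c => max 0 (min a (c - b))) cps bases cg).getD i 0) 1).flatMap
              (fun o => p.1.map (fun x => (bases.getD i 0 + o) * p.2 + x)),
           p.2 * cg.getD i 0))
        ([0], (1:Int))
      = pvBSpec bases cps (cg.take bases.length) := by
  intro bases
  induction bases with
  | nil =>
    intro cps cg h1 h2
    cases cps with
    | nil => simp [pvBSpec]
    | cons d ds => simp at h1
  | cons b bs ih =>
    intro cps cg h1 h2
    cases cps with
    | nil => simp at h1
    | cons d ds =>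
      cases cg with
      | nil => simp at h2
      | cons g gs =>
        have ih' := ih ds gs (by simpa using h1) (by simpa using h2)
        rw [List.foldl_reverse] at ih' ⊢
        simp only [List.length_cons, List.range_succ_eq_map, List.foldr_cons, List.foldr_map,
          List.getD_cons_zero, List.getD_cons_succ, pvZip3, List.take_succ_cons, pvBSpec]
        rw [ih']

theorem pvAltEq (sc ss cs cg : List Int)
    (h1 : sc.length = ss.length) (h2 : ss.length ≤ cs.length) (h3 : ss.length ≤ cg.length) :
    get_chunk_linear_indices_in_shard_alt sc ss cs cg
      = (pvBSpec
          (List.zipWith (fun c q => c * q) sc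
            (List.zipWith (fun s k => PySem.Int.floordiv s k) ss cs))
          (List.zipWith (fun s k => PySem.Int.floordiv s k) ss cs)
          (cg.take ss.length)).1 := by
  simp only [get_chunk_linear_indices_in_shard_alt]
  rw [pvRangeMapZip' _ ss.length ss cs rfl h2]
  set CPS := List.zipWith (fun s k => PySem.Int.floordiv s k) ss cs with hCPS
  have hcpslen : CPS.length = ss.length := by
    rw [hCPS]; simp [List.length_zipWith]; omega
  rw [pvRangeMapZip' _ ss.length sc CPS h1.symm (by omega)]
  set BASE := List.zipWith (fun c q => c * q) sc CPS with hBASE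
  have hbaselen : BASE.length = sc.length := by
    rw [hBASE]; simp [List.length_zipWith]; omega
  rw [pvRangeMapZip3' (fun a b c => max 0 (min a (c - b))) ss.length CPS BASE cg hcpslen.symm (by omega) (by omega)]
  rw [show List.range ss.length = List.range BASE.length by rw [hbaselen, h1]]
  rw [pvAltFoldEq BASE CPS cg (by omega) (by omega)]
  rw [show BASE.length = ss.length by omega]
  by_cases hz : ((pvZip3 (fun a b c => max 0 (min a (c - b))) CPS BASE cg).any (fun v => v == 0)) = true
  · rw [if_pos hz]
    rw [show (cg.take ss.length) = cg.take BASE.length by rw [hbaselen, h1]]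
    exact (pvBSpecNilOfZero BASE CPS cg (by omega) (by omega) hz).symm
  · rw [if_neg hz]

-- ===== VERDICT (by name: the statement is the Claim_ definition above) =====
theorem get_chunk_linear_indices_in_shard_spec : Claim_equal_get_chunk_linear_indices_in_shard := by
  unfold Claim_equal_get_chunk_linear_indices_in_shard
  intro sc ss cs cg _ hpre
  obtain ⟨h1, h2, h3, -⟩ := hpre
  unfold Spec_get_chunk_linear_indices_in_shard
  rw [pvPortAEq sc ss cs cg h1 h2 h3, pvAltEq sc ss cs cg h1 h2 h3]
  set CPS := List.zipWith (fun s k => PySem.Int.floordiv s k) ss cs with hCPS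
  set BASE := List.zipWith (fun c q => c * q) sc CPS with hBASE
  have hcgt : (cg.take ss.length).length = ss.length := by simp [List.length_take]; omega
  have hcpslen : CPS.length = ss.length := by
    rw [hCPS]; simp [List.length_zipWith]; omega
  have hbaselen : BASE.length = CPS.length := by
    rw [hBASE]; simp [List.length_zipWith]; omega
  rw [← pvMain BASE CPS (cg.take ss.length) hbaselen (by rw [hcpslen, hcgt])]
  have hfilter : (pyProduct CPS).filter
      (fun off => !((List.zipWith (fun c g => decide (g ≤ c))
          (List.zipWith (· + ·) BASE off) cg).any id))
      = (pyProduct CPS).filter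
          (fun off => !((List.zipWith (fun c g => decide (g ≤ c))
              (List.zipWith (· + ·) BASE off) (cg.take ss.length)).any id)) := by
    apply List.filter_congr
    intro off hoff
    have hofflen : off.length = CPS.length := pvProdMemLength CPS off hoff
    have hcl : (List.zipWith (· + ·) BASE off).length = ss.length := by
      simp [List.length_zipWith]; omega
    rw [← hcl, pvZipWithTakeRight]
  rw [hfilter]
  apply List.map_congr_left
  intro off hoff
  have hofflen : off.length = CPS.length :=
    pvProdMemLength CPS off (List.mem_filter.mp hoff).1
  have hcl : (List.zipWith (· + ·) BASE off).length = ss.length := by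
    simp [List.length_zipWith]; omega
  rw [← hcl, pvLinPairTake]
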